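-- pv_equiv track=rewrite | github.com/wwwwodddd/Zukunft | atcoder/abc293_f.py | F
-- ===== SOURCE A (Python) =====
-- def F(n, b):
-- 	if b < 2:
-- 		return False
-- 	while n > 0:
-- 		if n % b > 1:
-- 			return False
-- 		n //= b
-- 	return True
-- ===== SOURCE B (Python) =====
-- def F(n, b):
--     if b < 2:
--         return False
--     if n <= 0:
--         return True
--     p = 1
--     while p * b <= n:
--         p *= b
--     while p >= 1:
--         d = n // p
--         if d > 1:
--             return False
--         n -= d * p
--         p //= b
--     return True
-- ===== Notes on version B (the rewrite author's own statement) =====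
-- stated objective: alternative
-- what changed: B scans the base-b digits most-significant-first, maintaining an explicit power p built up by multiplication, instead of A's least-significant-first repeated-division loop.
import Mathlib
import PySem

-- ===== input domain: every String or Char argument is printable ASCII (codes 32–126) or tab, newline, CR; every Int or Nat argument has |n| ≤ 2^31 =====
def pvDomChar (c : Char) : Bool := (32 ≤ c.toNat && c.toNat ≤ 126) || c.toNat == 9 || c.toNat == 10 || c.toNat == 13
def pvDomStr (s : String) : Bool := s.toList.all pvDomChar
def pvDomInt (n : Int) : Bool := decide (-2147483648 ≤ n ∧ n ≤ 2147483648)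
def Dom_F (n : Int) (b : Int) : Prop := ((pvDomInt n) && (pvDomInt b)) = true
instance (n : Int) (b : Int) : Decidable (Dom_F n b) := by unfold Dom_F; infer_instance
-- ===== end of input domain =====

-- B rewrites A's LSB-first repeated-division digit check as an MSB-first scan with an explicit power; alternative decomposition, same cost.

-- termination helper for both ports' division loops
theorem pv_ediv_lt (n b : Int) (hn : 0 < n) (hb : 2 ≤ b) : n / b < n ∧ 0 ≤ n / b := by
  have h1 := Int.ediv_add_emod n b
  have h2 := Int.emod_nonneg n (by omega : b ≠ 0)
  have h3 := Int.ediv_nonneg (le_of_lt hn) (by omega : (0:Int) ≤ b)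
  constructor
  · nlinarith
  · exact h3

-- ===== PORT A =====
-- A's while loop; only entered with b ≥ 2 (carried as a proof for termination)
def Floop (b : Int) (hb : 2 ≤ b) (n : Int) : Bool :=
  if h : 0 < n then
    if PySem.Int.mod n b > 1 then false
    else Floop b hb (PySem.Int.floordiv n b)
  else true
termination_by n.toNat
decreasing_by
  have := PySem.Int.floordiv_eq_ediv_of_pos (a := n) (by omega : (0:Int) < b)
  have h2 := pv_ediv_lt n b h hb
  omega

def F (n : Int) (b : Int) : Bool :=
  if h : b < 2 then false
  else Floop b (by omega) n

-- ===== PORT B =====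
-- B's first while loop: raise p by factors of b while p*b ≤ n
def powUp (b n : Int) (hb : 2 ≤ b) (p : Int) (hp : 1 ≤ p) : Int :=
  if h : p * b ≤ n then powUp b n hb (p * b) (by nlinarith) else p
termination_by (n - p).toNat
decreasing_by
  have : p < p * b := by nlinarith
  omega

-- B's second while loop: MSB-first digit scan
def scanDown (b : Int) (hb : 2 ≤ b) (n p : Int) : Bool :=
  if h : 1 ≤ p then
    let d := PySem.Int.floordiv n p
    if d > 1 then false
    else scanDown b hb (n - d * p) (PySem.Int.floordiv p b)
  else true
termination_by p.toNat
decreasing_by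
  have := PySem.Int.floordiv_eq_ediv_of_pos (a := p) (by omega : (0:Int) < b)
  have h2 := pv_ediv_lt p b (by omega) hb
  omega

def F_alt (n : Int) (b : Int) : Bool :=
  if h : b < 2 then false
  else if n ≤ 0 then true
  else scanDown b (by omega) n (powUp b n (by omega) 1 (by omega))

-- ===== PRECONDITION & SPEC =====
def Spec_F (n : Int) (b : Int) (out : Bool) : Prop := out = F_alt n b
instance (n : Int) (b : Int) (out : Bool) : Decidable (Spec_F n b out) := by unfold Spec_F; infer_instance

-- ===== CLAIM (what is proved, stated in full; the proofs are below) =====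
def Claim_equal_F : Prop := ∀ (n : Int) (b : Int), Dom_F n b → Spec_F n b (F n b)

-- ===== LEMMAS AND PROOFS =====

theorem Floop_nonpos (b : Int) (hb : 2 ≤ b) (n : Int) (h : n ≤ 0) : Floop b hb n = true := by
  rw [Floop]; simp [show ¬ 0 < n by omega]

-- step form valid for all 0 ≤ n (for n = 0 both sides are true)
theorem Floop_step (b : Int) (hb : 2 ≤ b) (n : Int) (h : 0 ≤ n) :
    Floop b hb n = (!(PySem.Int.mod n b > 1) && Floop b hb (PySem.Int.floordiv n b)) := by
  rcases lt_or_eq_of_le h with h1 | h1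
  · rw [Floop]; simp only [h1, dif_pos]
    split_ifs with hgt
    · simp [hgt]
    · simp [hgt]
  · subst h1
    rw [Floop]
    have hm : PySem.Int.mod 0 b = 0 := by
      simp [PySem.Int.mod_eq_emod_of_pos (by omega : (0:Int) < b)]
    have hd : PySem.Int.floordiv 0 b = 0 := by
      simp [PySem.Int.floordiv_eq_ediv_of_pos (by omega : (0:Int) < b)]
    simp [hm, hd, Floop_nonpos b hb 0 le_rfl]

-- splitting lemma: Floop (d * b^m + r) = Floop d && Floop r  when 0 ≤ r < b^m, 0 ≤ d
theorem Floop_split (b : Int) (hb : 2 ≤ b) :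
    ∀ (m : Nat) (d r : Int), 0 ≤ d → 0 ≤ r → r < b ^ m →
      Floop b hb (d * b ^ m + r) = (Floop b hb d && Floop b hb r) := by
  intro m
  induction m with
  | zero =>
    intro d r hd hr hlt
    have : r = 0 := by simp only [pow_zero] at hlt; omega
    subst this
    simp [Floop_nonpos b hb 0 le_rfl]
  | succ m ih =>
    intro d r hd hr hlt
    have hbpos : (0:Int) < b := by omega
    have hbm : (0:Int) < b ^ m := pow_pos hbpos m
    have hbm1 : (0:Int) < b ^ (m+1) := pow_pos hbpos (m+1)
    have hn0 : 0 ≤ d * b ^ (m+1) + r := by positivity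
    rw [Floop_step b hb _ hn0, Floop_step b hb r hr]
    have hmodeq : PySem.Int.mod (d * b ^ (m+1) + r) b = PySem.Int.mod r b := by
      rw [PySem.Int.mod_eq_emod_of_pos hbpos, PySem.Int.mod_eq_emod_of_pos hbpos]
      have : d * b ^ (m+1) + r = r + b * (d * b ^ m) := by ring
      rw [this, Int.add_mul_emod_self_left]
    have hdiveq : PySem.Int.floordiv (d * b ^ (m+1) + r) b
        = d * b ^ m + PySem.Int.floordiv r b := by
      rw [PySem.Int.floordiv_eq_ediv_of_pos hbpos, PySem.Int.floordiv_eq_ediv_of_pos hbpos]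
      have : d * b ^ (m+1) + r = r + (d * b ^ m) * b := by ring
      rw [this, Int.add_mul_ediv_right _ _ (by omega : b ≠ 0)]
      ring
    rw [hmodeq, hdiveq]
    have hr' : PySem.Int.floordiv r b < b ^ m := by
      rw [PySem.Int.floordiv_eq_ediv_of_pos hbpos]
      have := Int.ediv_le_ediv hbpos (le_of_lt hlt)
      have h2 : b ^ (m+1) / b = b ^ m := by
        rw [pow_succ, Int.mul_ediv_cancel _ (by omega : b ≠ 0)]
      rcases lt_or_ge (r / b) (b ^ m) with h | h
      · exact h
      · exfalso
        have : b ^ m * b ≤ r := by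
          have := Int.le_ediv_iff_mul_le hbpos |>.mp h
          linarith
        rw [pow_succ] at hlt; omega
    have hr0 : 0 ≤ PySem.Int.floordiv r b := by
      rw [PySem.Int.floordiv_eq_ediv_of_pos hbpos]
      exact Int.ediv_nonneg hr (by omega)
    rw [ih d _ hd hr0 hr']
    cases Floop b hb d <;> simp

-- for 0 ≤ d < b, Floop b d = (d ≤ 1)
theorem Floop_digit (b : Int) (hb : 2 ≤ b) (d : Int) (h0 : 0 ≤ d) (h1 : d < b) :
    Floop b hb d = decide (d ≤ 1) := by
  have hbpos : (0:Int) < b := by omega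
  rw [Floop_step b hb d h0]
  have hm : PySem.Int.mod d b = d := by
    rw [PySem.Int.mod_eq_emod_of_pos hbpos, Int.emod_eq_of_lt h0 h1]
  have hd : PySem.Int.floordiv d b = 0 := by
    rw [PySem.Int.floordiv_eq_ediv_of_pos hbpos, Int.ediv_eq_zero_of_lt h0 h1]
  rw [hm, hd, Floop_nonpos b hb 0 le_rfl]
  by_cases h : d ≤ 1 <;> simp [h] <;> omega

-- main bridge: scanDown starting at p = b^k agrees with Floop for 0 ≤ n < b^(k+1)
theorem scanDown_eq_Floop (b : Int) (hb : 2 ≤ b) :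
    ∀ (k : Nat) (n : Int), 0 ≤ n → n < b ^ (k+1) →
      scanDown b hb n (b ^ k) = Floop b hb n := by
  intro k
  induction k with
  | zero =>
    intro n hn hlt
    have hlt' : n < b := by simpa using hlt
    simp only [pow_zero]
    rw [scanDown]
    have hd1 : PySem.Int.floordiv n 1 = n := by
      rw [PySem.Int.floordiv_eq_ediv_of_pos (by omega : (0:Int) < 1)]; simp
    have hbdiv : PySem.Int.floordiv 1 b = 0 := by
      rw [PySem.Int.floordiv_eq_ediv_of_pos (by omega : (0:Int) < b)]
      exact Int.ediv_eq_zero_of_lt (by omega) (by omega)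
    simp only [show (1:Int) ≤ 1 from le_rfl, dif_pos, hd1, hbdiv]
    rw [Floop_digit b hb n hn hlt']
    by_cases h : n > 1
    · simp only [h, if_pos]
      simp; omega
    · simp only [h, if_false]
      have hle : n ≤ 1 := by omega
      rw [scanDown]
      simp [hle]
  | succ k ih =>
    intro n hn hlt
    have hbpos : (0:Int) < b := by omega
    have hpk : (0:Int) < b ^ (k+1) := pow_pos hbpos (k+1)
    rw [scanDown]
    set d := PySem.Int.floordiv n (b ^ (k+1)) with hdq
    have hdediv : d = n / b ^ (k+1) := by
      rw [hdq, PySem.Int.floordiv_eq_ediv_of_pos hpk]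
    have hd0 : 0 ≤ d := by rw [hdediv]; exact Int.ediv_nonneg hn (le_of_lt hpk)
    have hdb : d < b := by
      rw [hdediv]
      rcases lt_or_ge (n / b ^ (k+1)) b with h | h
      · exact h
      · exfalso
        have : b ^ (k+1) * b ≤ n := by
          have := Int.le_ediv_iff_mul_le hpk |>.mp h; linarith
        rw [pow_succ] at hlt; omega
    set r := n - d * b ^ (k+1) with hrq
    have hrmod : r = n % b ^ (k+1) := by
      rw [hrq, hdediv, Int.emod_def]; ring
    have hr0 : 0 ≤ r := by rw [hrmod]; exact Int.emod_nonneg n (by omega)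
    have hrlt : r < b ^ (k+1) := by rw [hrmod]; exact Int.emod_lt_of_pos n hpk
    have hpb : PySem.Int.floordiv (b ^ (k+1)) b = b ^ k := by
      rw [PySem.Int.floordiv_eq_ediv_of_pos hbpos, pow_succ,
        Int.mul_ediv_cancel _ (by omega : b ≠ 0)]
    have hsplit : Floop b hb n = (Floop b hb d && Floop b hb r) := by
      have : n = d * b ^ (k+1) + r := by rw [hrq]; ring
      rw [this]
      exact Floop_split b hb (k+1) d r hd0 hr0 hrlt
    simp only [show (1:Int) ≤ b ^ (k+1) from hpk, dif_pos, hpb]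
    by_cases hgt : d > 1
    · simp only [hgt, if_pos]
      rw [hsplit, Floop_digit b hb d hd0 hdb]
      simp; omega
    · simp only [hgt, if_neg, if_false]
      rw [← hrq, ih r hr0 hrlt, hsplit, Floop_digit b hb d hd0 hdb]
      have : d ≤ 1 := by omega
      simp [this]

-- powUp returns a power of b bracketed by n
theorem powUp_spec (b n : Int) (hb : 2 ≤ b) :
    ∀ (fuel : Nat) (p : Int) (hp : 1 ≤ p), (n - p).toNat ≤ fuel → p ≤ n →
      ∃ k : Nat, powUp b n hb p hp = p * b ^ k ∧ powUp b n hb p hp ≤ n ∧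
        n < powUp b n hb p hp * b := by
  intro fuel
  induction fuel with
  | zero =>
    intro p hp hfuel hpn
    rw [powUp]
    have hnot : ¬ p * b ≤ n := by
      intro h
      have : p < p * b := by nlinarith
      omega
    simp only [hnot, dif_neg, not_false_iff]
    exact ⟨0, by ring, hpn, by omega⟩
  | succ f ih =>
    intro p hp hfuel hpn
    rw [powUp]
    by_cases h : p * b ≤ n
    · simp only [h, dif_pos]
      have hp' : 1 ≤ p * b := by nlinarith
      have hf' : (n - p * b).toNat ≤ f := by
        have : p < p * b := by nlinarith
        omega
      obtain ⟨k, hk1, hk2, hk3⟩ := ih (p * b) (by nlinarith) hf' h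
      exact ⟨k + 1, by rw [hk1]; ring, hk2, hk3⟩
    · simp only [h, dif_neg, not_false_iff]
      exact ⟨0, by ring, hpn, by omega⟩

-- ===== VERDICT (by name: the statement is the Claim_ definition above) =====
theorem F_spec : Claim_equal_F := by
  intro n b _
  unfold Spec_F F F_alt
  by_cases hb : b < 2
  · simp [hb]
  · simp only [hb, dif_neg, not_false_iff]
    have hb2 : 2 ≤ b := by omega
    by_cases hn : n ≤ 0
    · simp [hn, Floop_nonpos b _ n hn]
    · simp only [hn, if_neg, if_false]
      have hn1 : 1 ≤ n := by omega
      obtain ⟨k, hk1, hk2, hk3⟩ :=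
        powUp_spec b n (by omega) (n - 1).toNat 1 (by omega) (by omega) hn1
      rw [hk1] at hk3 ⊢
      simp only [one_mul] at hk3 ⊢
      exact (scanDown_eq_Floop b _ k n (by omega) (by rw [pow_succ]; exact hk3)).symm
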